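-- pv_equiv track=rewrite | github.com/anuvansh-dev/dailylogs | lc1.py | mergestrs
-- ===== SOURCE A (Python) =====
-- def mergestrs(word1, word2):
--
--     mergedstr = ""
--     length = min(len(word1), len(word2))
--
--     for i in range(length):
--             mergedstr += word1[i] + word2[i]
--
--     mergedstr += word1[length:]
--     mergedstr += word2[length:]
--
--
--     return mergedstr
-- ===== SOURCE B (Python) =====
-- from itertools import zip_longest
--
-- def mergestrs(word1, word2):
--     return "".join(a + b for a, b in zip_longest(word1, word2, fillvalue=""))
-- ===== Notes on version B (the rewrite author's own statement) =====
-- stated objective: idiomatic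
-- what changed: Replaces the explicit min-length index loop with string concatenation plus two tail slices by a single padded-pair iteration over zip_longest joined once, with no separate tail phase.
import Mathlib
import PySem

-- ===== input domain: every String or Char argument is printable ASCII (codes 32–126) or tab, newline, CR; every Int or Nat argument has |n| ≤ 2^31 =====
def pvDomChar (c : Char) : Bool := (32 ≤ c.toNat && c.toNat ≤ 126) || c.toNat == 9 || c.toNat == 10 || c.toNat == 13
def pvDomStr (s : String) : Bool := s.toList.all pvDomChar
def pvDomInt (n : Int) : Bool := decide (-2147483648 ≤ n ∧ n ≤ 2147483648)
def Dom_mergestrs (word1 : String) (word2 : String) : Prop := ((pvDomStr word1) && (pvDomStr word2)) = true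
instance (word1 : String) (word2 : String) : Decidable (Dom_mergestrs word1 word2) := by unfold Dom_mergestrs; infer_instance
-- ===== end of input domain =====

-- B replaces A's min-length index loop plus two tail slices by a single padded-pair
-- (zip_longest-style) recursion joined once; objective: idiomatic.

-- ===== PORT A =====
-- for i in range(length): mergedstr += word1[i] + word2[i]; then the two tail slices.
def mergestrsCore (w1 w2 : List Char) : List Char :=
  let length := min w1.length w2.length
  let merged := (PySem.List.pyRange 0 (length : Int) 1).foldl
    (fun acc i => acc ++ [PySem.List.pyGetD w1 i ' ', PySem.List.pyGetD w2 i ' ']) []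
  merged ++ PySem.List.slice w1 (some (length : Int)) none
         ++ PySem.List.slice w2 (some (length : Int)) none

def mergestrs (word1 : String) (word2 : String) : String :=
  String.mk (mergestrsCore word1.toList word2.toList)

-- ===== PORT B =====
-- zip_longest(word1, word2, fillvalue='') joined pairwise: structural recursion on both lists.
def mergeZip : List Char → List Char → List Char
  | [], ys => ys
  | x :: xs, [] => x :: xs
  | x :: xs, y :: ys => x :: y :: mergeZip xs ys

def mergestrs_alt (word1 : String) (word2 : String) : String :=
  String.mk (mergeZip word1.toList word2.toList)

-- ===== PRECONDITION & SPEC =====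
def Spec_mergestrs (word1 : String) (word2 : String) (out : String) : Prop := out = mergestrs_alt word1 word2
instance (word1 : String) (word2 : String) (out : String) : Decidable (Spec_mergestrs word1 word2 out) := by unfold Spec_mergestrs; infer_instance

-- ===== CLAIM (what is proved, stated in full; the proofs are below) =====
def Claim_equal_mergestrs : Prop := ∀ (word1 : String) (word2 : String), Dom_mergestrs word1 word2 → Spec_mergestrs word1 word2 (mergestrs word1 word2)

-- ===== LEMMAS AND PROOFS =====

-- A's interleaving phase plus tails, expressed over Nat indices, equals the zip recursion.
theorem flatMap_range_min_eq_mergeZip : ∀ (w1 w2 : List Char),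
    (List.range (min w1.length w2.length)).flatMap
      (fun k => [w1.getD k ' ', w2.getD k ' '])
      ++ (w1.drop (min w1.length w2.length) ++ w2.drop (min w1.length w2.length))
    = mergeZip w1 w2 := by
  intro w1
  induction w1 with
  | nil => intro w2; simp [mergeZip]
  | cons x xs ih =>
    intro w2
    cases w2 with
    | nil => simp [mergeZip]
    | cons y ys =>
      have hmin : min (x :: xs).length (y :: ys).length
          = min xs.length ys.length + 1 := by
        simp [List.length_cons, Nat.succ_min_succ]
      rw [hmin, List.range_succ_eq_map]
      simp only [List.flatMap_cons, List.flatMap_map, List.getD_cons_zero,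
        List.getD_cons_succ, List.drop_succ_cons]
      simpa [mergeZip, List.append_assoc] using congrArg (fun l => x :: y :: l) (ih ys)

-- A's core computation rewritten into the Nat-indexed shape above.
theorem mergestrsCore_eq_mergeZip (w1 w2 : List Char) :
    mergestrsCore w1 w2 = mergeZip w1 w2 := by
  simp only [mergestrsCore]
  rw [PySem.List.foldl_append_eq_flatMap, PySem.List.pyRange_zero_natCast,
      PySem.List.slice_from_natCast, PySem.List.slice_from_natCast,
      List.flatMap_map]
  simp only [PySem.List.pyGetD_natCast, List.nil_append]
  rw [List.append_assoc]
  exact flatMap_range_min_eq_mergeZip w1 w2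

-- ===== VERDICT (by name: the statement is the Claim_ definition above) =====
theorem mergestrs_spec : Claim_equal_mergestrs := by
  intro word1 word2 _
  unfold Spec_mergestrs mergestrs mergestrs_alt
  rw [mergestrsCore_eq_mergeZip]
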